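-- pv_equiv track=rewrite | github.com/WalsonK/DRLPy | environement/farkle.py | check_multiples
-- ===== SOURCE A (Python) =====
-- from collections import Counter
--
-- def check_multiples(dices: list) -> tuple:
--     """
--     Check for multiples (3, 4, 5x, or 6 of the same number) in the dice.
--
--     This function calculates the score for any multiples found and returns the score
--     along with a list of dice that have been used for these combinations, and a binary list
--     indicating which dice were used (1 for used, 0 for not used).
--
--     Returns:
--         tuple: A tuple containing:
--             - score (int): The score based on the multiples found.
--             - used_dice (list): A list of integers representing the dice used in the multiples.
--             - binary_used_dice (list): A list of integers (1 or 0) indicating which dice were used.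
--     """
--     counts = Counter(dices)
--     score = 0
--     used_dice = []
--
--     binary_used_dice = [0] * len(dices)
--
--     for num, count in counts.items():
--         if count >= 3:
--             base_score = (
--                 1000 if num == 1 else num * 100
--             )  # 1000 for three 1s, otherwise num * 100
--
--             score += base_score
--
--             if count == 4:
--                 score += base_score  # x2 for 4 dice
--             elif count == 5:
--                 score += base_score * 3  # x4 for 5 dice
--             elif count == 6:
--                 score += base_score * 7  # x8 for 6 dice
--
--             used_dice.extend([num] * count)
--
--             used_count = 0
--             for i, d in enumerate(dices):
--                 if d == num and used_count < count:
--                     binary_used_dice[i] = 1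
--                     used_count += 1
--
--     return score, used_dice, binary_used_dice
-- ===== SOURCE B (Python) =====
-- def check_multiples(dices: list) -> tuple:
--     # One pass: map each value to the list of its indices (first-occurrence order).
--     positions = {}
--     for i, d in enumerate(dices):
--         positions.setdefault(d, []).append(i)
--
--     score = 0
--     used_dice = []
--     binary_used_dice = [0] * len(dices)
--
--     for num, idxs in positions.items():
--         count = len(idxs)
--         if count >= 3:
--             base_score = 1000 if num == 1 else num * 100
--             score += base_score * {4: 2, 5: 4, 6: 8}.get(count, 1)
--             used_dice += [num] * count
--             for i in idxs:
--                 binary_used_dice[i] = 1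
--
--     return score, used_dice, binary_used_dice
-- ===== Notes on version B (the rewrite author's own statement) =====
-- stated objective: alternative
-- what changed: B builds a value-to-indices dict in one pass and marks used positions directly from the stored indices (multiplier from a lookup table), instead of Counter plus a full guarded rescan of the dice for every scored value.
import Mathlib
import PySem

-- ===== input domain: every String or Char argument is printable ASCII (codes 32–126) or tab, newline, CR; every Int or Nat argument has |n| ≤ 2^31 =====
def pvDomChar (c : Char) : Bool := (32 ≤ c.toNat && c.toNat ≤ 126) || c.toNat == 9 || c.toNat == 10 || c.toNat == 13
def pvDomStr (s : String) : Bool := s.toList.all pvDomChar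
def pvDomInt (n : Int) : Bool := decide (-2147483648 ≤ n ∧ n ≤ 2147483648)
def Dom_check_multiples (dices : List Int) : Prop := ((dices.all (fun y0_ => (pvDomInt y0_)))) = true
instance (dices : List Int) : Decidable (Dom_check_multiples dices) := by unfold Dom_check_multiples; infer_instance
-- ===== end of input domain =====

-- B replaces A's Counter + per-value rescan of the dice with a single value→indices dict built
-- in one pass, marking used positions directly from the stored indices (objective: alternative).

-- ===== PORT A =====
-- literal transliteration of Source A: Counter, then for each (num, count) an if-chain of
-- multipliers and a full rescan of `dices` marking the first `count` occurrences.
def check_multiples (dices : List Int) : Int × List Int × List Int :=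
  let counts := PySem.Dict.counter dices
  let binary0 : List Int := List.replicate dices.length 0
  (counts.items).foldl
    (fun (st : Int × List Int × List Int) (p : Int × Int) =>
      let score := st.1
      let used_dice := st.2.1
      let binary := st.2.2
      let num := p.1
      let count := p.2
      if count ≥ 3 then
        let base_score : Int := if num = 1 then 1000 else num * 100
        let score := score + base_score
        let score :=
          if count = 4 then score + base_score
          else if count = 5 then score + base_score * 3
          else if count = 6 then score + base_score * 7
          else score
        let used_dice := used_dice ++ List.replicate count.toNat num
        -- for i, d in enumerate(dices): if d == num and used_count < count: binary[i] = 1; used_count += 1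
        -- (binary[i] = 1 via pySet?; the index produced by enumerate is always in range, so the
        --  `.getD` fallback is unreachable)
        let mark := (PySem.List.enumerate dices).foldl
          (fun (q : List Int × Int) (e : Int × Int) =>
            if e.2 = num ∧ q.2 < count then ((PySem.List.pySet? q.1 e.1 1).getD q.1, q.2 + 1)
            else q)
          (binary, 0)
        (score, used_dice, mark.1)
      else (score, used_dice, binary))
    (0, [], binary0)

-- ===== PORT B =====
-- literal transliteration of Source B: one pass builds positions : value → list of indices,
-- then one loop over its items; multiplier from a small dict; marks exactly the stored indices.
def check_multiples_alt (dices : List Int) : Int × List Int × List Int :=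
  let positions := (PySem.List.enumerate dices).foldl
    (fun (d : PySem.Dict Int (List Int)) (p : Int × Int) => d.modify p.2 [] (fun l => l ++ [p.1]))
    PySem.Dict.empty
  let multipliers : PySem.Dict Int Int :=
    ((PySem.Dict.empty).insert 4 2).insert 5 4 |>.insert 6 8
  (positions.items).foldl
    (fun (st : Int × List Int × List Int) (p : Int × List Int) =>
      let score := st.1
      let used_dice := st.2.1
      let binary := st.2.2
      let num := p.1
      let idxs := p.2
      let count : Int := (idxs.length : Int)
      if count ≥ 3 then
        let base_score : Int := if num = 1 then 1000 else num * 100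
        let score := score + base_score * (multipliers.getD count 1)
        let used_dice := used_dice ++ List.replicate count.toNat num
        -- binary[i] = 1 for each stored index (always in range; `.getD` fallback unreachable)
        let binary := idxs.foldl (fun b i => (PySem.List.pySet? b i 1).getD b) binary
        (score, used_dice, binary)
      else (score, used_dice, binary))
    (0, [], List.replicate dices.length 0)

-- ===== PRECONDITION & SPEC =====
def Spec_check_multiples (dices : List Int) (out : Int × List Int × List Int) : Prop := out = check_multiples_alt dices
instance (dices : List Int) (out : Int × List Int × List Int) : Decidable (Spec_check_multiples dices out) := by unfold Spec_check_multiples; infer_instance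

-- ===== CLAIM (what is proved, stated in full; the proofs are below) =====
def Claim_equal_check_multiples : Prop := ∀ (dices : List Int), Dom_check_multiples dices → Spec_check_multiples dices (check_multiples dices)

-- ===== LEMMAS AND PROOFS =====

-- `pvMark num ds j b`: set position j+i of b to 1 for every i with ds[i] = num
-- (the common meaning of A's guarded rescan and of B's stored-index marking).
def pvMark (num : Int) : List Int → Nat → List Int → List Int
  | [], _, b => b
  | d :: t, j, b => pvMark num t (j + 1) (if d = num then b.set j 1 else b)

theorem pvSet_eq (b : List Int) (j : Nat) :
    (PySem.List.pySet? b (j : Int) 1).getD b = b.set j 1 := by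
  by_cases h : j < b.length
  · simp [PySem.List.pySet?, PySem.List.pyIdx?, h]
  · simp [PySem.List.pySet?, PySem.List.pyIdx?, h]
    rw [List.set_eq_of_length_le]; omega

theorem pvEnum_cons (x : Int) (xs : List Int) (s : Int) :
    PySem.List.enumerate (x :: xs) s = (s, x) :: PySem.List.enumerate xs (s + 1) := rfl

-- A's inner rescan: since used_count never reaches count before the last occurrence,
-- it marks every occurrence of num.
theorem pvLemA (num cnt : Int) (ds : List Int) :
    ∀ (j : Nat) (b : List Int) (uc : Int), uc + (ds.count num : Int) ≤ cnt →
    (PySem.List.enumerate ds (j : Int)).foldl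
      (fun (q : List Int × Int) (e : Int × Int) =>
        if e.2 = num ∧ q.2 < cnt then ((PySem.List.pySet? q.1 e.1 1).getD q.1, q.2 + 1) else q)
      (b, uc)
    = (pvMark num ds j b, uc + (ds.count num : Int)) := by
  induction ds with
  | nil => intro j b uc h; simp [pvMark, PySem.List.enumerate]
  | cons d t ih =>
    intro j b uc h
    rw [pvEnum_cons]
    by_cases hd : d = num
    · have hcnt : (d :: t).count num = t.count num + 1 := by
        simp [hd]
      have huc : uc < cnt := by rw [hcnt] at h; push_cast at h; omega
      simp only [List.foldl_cons, hd, huc, and_self, if_pos]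
      rw [pvSet_eq]
      have : ((j : Int) + 1) = ((j + 1 : Nat) : Int) := by push_cast; ring
      rw [this, ih (j + 1) (b.set j 1) (uc + 1) (by rw [hcnt] at h; push_cast at h ⊢; omega)]
      simp only [pvMark, Prod.ext_iff]
      constructor
      · rfl
      · simp only [List.count_cons_self]; push_cast; omega
    · have hcnt : (d :: t).count num = t.count num := by
        simp [hd]
      simp only [List.foldl_cons, hd, false_and, if_false]
      have : ((j : Int) + 1) = ((j + 1 : Nat) : Int) := by push_cast; ring
      rw [this, ih (j + 1) b uc (by rw [hcnt] at h; omega)]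
      rw [pvMark, if_neg hd, hcnt]

-- B's marking of the stored indices of num.
theorem pvLemB (num : Int) (ds : List Int) :
    ∀ (j : Nat) (b : List Int),
    ((((PySem.List.enumerate ds (j : Int)).filter (fun q => q.2 == num)).map (fun q => q.1)).foldl
      (fun b i => (PySem.List.pySet? b i 1).getD b) b)
    = pvMark num ds j b := by
  induction ds with
  | nil => intro j b; simp [pvMark, PySem.List.enumerate]
  | cons d t ih =>
    intro j b
    rw [pvEnum_cons]
    have : ((j : Int) + 1) = ((j + 1 : Nat) : Int) := by push_cast; ring
    by_cases hd : d = num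
    · simp only [List.filter_cons, hd, beq_self_eq_true, if_pos, List.map_cons, List.foldl_cons]
      rw [pvSet_eq, this, ih (j + 1) (b.set j 1)]
      simp [pvMark]
    · have : (d == num) = false := by simp [hd]
      simp only [List.filter_cons, this, Bool.false_eq_true, if_false]
      have h1 : ((j : Int) + 1) = ((j + 1 : Nat) : Int) := by push_cast; ring
      rw [h1, ih (j + 1) b, pvMark, if_neg hd]

theorem pvLemLen (num : Int) (ds : List Int) :
    ∀ (j : Int), ((PySem.List.enumerate ds j).filter (fun q => q.2 == num)).length
      = ds.count num := by
  induction ds with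
  | nil => intro j; simp [PySem.List.enumerate]
  | cons d t ih =>
    intro j
    rw [pvEnum_cons]
    by_cases hd : d = num
    · simp [hd, ih (j + 1)]
    · have hb : (d == num) = false := by simp [hd]
      simp [hb, hd, ih (j + 1)]

theorem pvLemSnd (ds : List Int) : ∀ (j : Int),
    (PySem.List.enumerate ds j).map (fun p => p.2) = ds := by
  induction ds with
  | nil => intro j; simp [PySem.List.enumerate]
  | cons d t ih => intro j; rw [pvEnum_cons]; simp [ih (j + 1)]

theorem pvLemMult (cnt : Int) :
    ((((PySem.Dict.empty).insert 4 2).insert 5 4 |>.insert 6 8) : PySem.Dict Int Int).getD cnt 1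
    = if cnt = 4 then 2 else if cnt = 5 then 4 else if cnt = 6 then 8 else 1 := by
  have hitems : (((((PySem.Dict.empty).insert 4 2).insert 5 4 |>.insert 6 8) : PySem.Dict Int Int)).items
      = [(4, 2), (5, 4), (6, 8)] := by decide
  simp only [PySem.Dict.getD, PySem.Dict.get?, hitems]
  by_cases h4 : cnt = 4
  · simp [h4]
  · have e4 : ((4 : Int) == cnt) = false := by simp; omega
    by_cases h5 : cnt = 5
    · simp [h5, List.find?]
    · have e5 : ((5 : Int) == cnt) = false := by simp; omega
      by_cases h6 : cnt = 6
      · simp [h6, List.find?]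
      · have e6 : ((6 : Int) == cnt) = false := by simp; omega
        simp [e4, e5, e6, h4, h5, h6, List.find?]

-- the per-key index list B stores for key k
def pvIdxs (dices : List Int) (k : Int) : List Int :=
  ((PySem.List.enumerate dices 0).filter (fun q => q.2 == k)).map (fun q => q.1)

theorem pvIdxs_length (dices : List Int) (k : Int) :
    (pvIdxs dices k).length = dices.count k := by
  simp [pvIdxs, pvLemLen]

-- both outer loops, over the same distinct-value list S, keep identical states
theorem pvMainFold (dices : List Int) (S : List Int) :
    ∀ (st : Int × List Int × List Int),
    (S.map (fun k => (k, (dices.count k : Int)))).foldl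
      (fun (st : Int × List Int × List Int) (p : Int × Int) =>
        if p.2 ≥ 3 then
          ((if p.2 = 4 then st.1 + (if p.1 = 1 then 1000 else p.1 * 100) + (if p.1 = 1 then 1000 else p.1 * 100)
            else if p.2 = 5 then st.1 + (if p.1 = 1 then 1000 else p.1 * 100) + (if p.1 = 1 then 1000 else p.1 * 100) * 3
            else if p.2 = 6 then st.1 + (if p.1 = 1 then 1000 else p.1 * 100) + (if p.1 = 1 then 1000 else p.1 * 100) * 7
            else st.1 + (if p.1 = 1 then 1000 else p.1 * 100)),
           st.2.1 ++ List.replicate p.2.toNat p.1,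
           ((PySem.List.enumerate dices 0).foldl
              (fun (q : List Int × Int) (e : Int × Int) =>
                if e.2 = p.1 ∧ q.2 < p.2 then ((PySem.List.pySet? q.1 e.1 1).getD q.1, q.2 + 1) else q)
              (st.2.2, 0)).1)
        else st) st
    =
    (S.map (fun k => (k, pvIdxs dices k))).foldl
      (fun (st : Int × List Int × List Int) (p : Int × List Int) =>
        if (p.2.length : Int) ≥ 3 then
          (st.1 + (if p.1 = 1 then 1000 else p.1 * 100) *
             (((((PySem.Dict.empty).insert 4 2).insert 5 4 |>.insert 6 8) : PySem.Dict Int Int).getD (p.2.length : Int) 1),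
           st.2.1 ++ List.replicate ((p.2.length : Int)).toNat p.1,
           p.2.foldl (fun b i => (PySem.List.pySet? b i 1).getD b) st.2.2)
        else st) st := by
  induction S with
  | nil => intro st; simp
  | cons k S ih =>
    intro st
    simp only [List.map_cons, List.foldl_cons]
    rw [ih]
    congr 1
    have hlen : ((pvIdxs dices k).length : Int) = (dices.count k : Int) := by
      rw [pvIdxs_length]
    rw [hlen]
    by_cases h3 : (dices.count k : Int) ≥ 3
    · simp only [h3, if_pos]
      refine Prod.ext ?_ (Prod.ext ?_ ?_)
      · simp only [pvLemMult]
        by_cases h4 : (dices.count k : Int) = 4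
        · simp [h4]; split_ifs <;> ring
        · by_cases h5 : (dices.count k : Int) = 5
          · simp [h5]; split_ifs <;> ring
          · by_cases h6 : (dices.count k : Int) = 6
            · simp [h6]; split_ifs <;> ring
            · simp [h4, h5, h6]
      · rfl
      · show ((PySem.List.enumerate dices 0).foldl _ (st.2.2, 0)).1 = _
        have hA := pvLemA k (dices.count k) dices 0 st.2.2 0 (by omega)
        have h0 : ((0 : Nat) : Int) = (0 : Int) := rfl
        rw [h0] at hA
        rw [hA]
        have hB := pvLemB k dices 0 st.2.2
        rw [h0] at hB
        exact hB.symm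
    · simp [h3]

-- ===== assembling the two programs into the folds above =====
theorem pvPositions_items (dices : List Int) :
    ((PySem.List.enumerate dices 0).foldl
      (fun (d : PySem.Dict Int (List Int)) (p : Int × Int) => d.modify p.2 [] (fun l => l ++ [p.1]))
      PySem.Dict.empty).items
    = (PySem.Set.ofList dices).map (fun k => (k, pvIdxs dices k)) := by
  set e := PySem.List.enumerate dices 0 with he
  set posd := e.foldl
      (fun (d : PySem.Dict Int (List Int)) (p : Int × Int) => d.modify p.2 [] (fun l => l ++ [p.1]))
      PySem.Dict.empty with hpos
  have hkeys : posd.keys = PySem.Set.ofList dices := by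
    rw [hpos, PySem.Dict.keys_foldl_modify_key e (fun p => p.2) [] (fun _ p => fun l => l ++ [p.1])]
    show PySem.Set.update PySem.Set.empty (e.map (fun p => p.2)) = _
    rw [he, pvLemSnd dices 0]
    rfl
  have hnodup : posd.keys.Nodup := by
    rw [hkeys]; exact PySem.Set.nodup_ofList dices
  have hgetD : ∀ k, posd.getD k [] = pvIdxs dices k := by
    intro k
    have : posd = (e.map (fun p => (p.2, p.1))).foldl
        (fun (d : PySem.Dict Int (List Int)) (p : Int × Int) => d.modify p.1 [] (fun l => l ++ [p.2]))
        PySem.Dict.empty := by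
      rw [hpos, List.foldl_map]
    rw [this, PySem.Dict.getD_foldl_modify_append]
    simp [pvIdxs, List.filter_map, Function.comp_def, he]
  rw [PySem.Dict.items_eq_map_keys posd hnodup [], hkeys]
  apply List.map_congr_left
  intro k _
  rw [hgetD k]

theorem check_multiples_spec : Claim_equal_check_multiples := by
  intro dices _
  unfold Spec_check_multiples check_multiples check_multiples_alt
  simp only []
  rw [PySem.Dict.items_counter dices, pvPositions_items dices]
  exact pvMainFold dices (PySem.Set.ofList dices) (0, [], List.replicate dices.length 0)
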